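-- pv_equiv track=rewrite | github.com/cimat-ris/TrajectoryInference | GPMixture/utils/manip_trajectories.py | traj_goal_sequence
-- ===== SOURCE A (Python) =====
-- def traj_goal_sequence(tr, goals):
--     goalSeq = []
--     x, y = tr[0], tr[1]
--
--     for i in range(len(x)):
--         for j in range(len(goals)):
--             xy = [x[i], y[i]]
--             if is_in_area(xy, goals[j]):
--                 if len(goalSeq) == 0:
--                     goalSeq.append(j)
--                 else:
--                     if j != goalSeq[-1]:
--                         goalSeq.append(j)
--     return goalSeq
--
-- def is_in_area(p,R):
--     x = p[0]
--     y = p[1]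
--     if(x >= R[0] and x <= R[len(R)-2]):
--         if(y >= R[1] and y <= R[len(R)-1]):
--             return 1
--         else:
--             return 0
--     else:
--         return 0
-- ===== SOURCE B (Python) =====
-- def is_in_area(p,R):
--     x = p[0]
--     y = p[1]
--     if(x >= R[0] and x <= R[len(R)-2]):
--         if(y >= R[1] and y <= R[len(R)-1]):
--             return 1
--         else:
--             return 0
--     else:
--         return 0
--
-- def traj_goal_sequence(tr, goals):
--     x, y = tr[0], tr[1]
--     n = len(x)
--     # goal-major sweep (the transpose of A's point-major scan): for each goal,
--     # drop its index into the per-point bucket of every point it contains.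
--     # Within one bucket indices stay ascending because the outer loop ascends in j,
--     # so flattening the buckets point by point recovers A's visit order.
--     buckets = [[] for _ in range(n)]
--     for j, g in enumerate(goals):
--         for i in range(n):
--             if is_in_area([x[i], y[i]], g):
--                 buckets[i].append(j)
--     flat = [j for b in buckets for j in b]
--     # collapse runs of consecutive equal goal indices
--     return [k for k, prev in zip(flat, [None] + flat) if k != prev]
-- ===== Notes on version B (the rewrite author's own statement) =====
-- stated objective: alternative
-- what changed: B transposes A's traversal: instead of A's point-major nested scan with an inline last-element dedup on the growing output, B does a goal-major sweep that appends each goal index into a per-point bucket list, then flattens the buckets point by point and run-compresses consecutive duplicates in a final pass; the orders agree because each bucket collects its indices in ascending j.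
import Mathlib
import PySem

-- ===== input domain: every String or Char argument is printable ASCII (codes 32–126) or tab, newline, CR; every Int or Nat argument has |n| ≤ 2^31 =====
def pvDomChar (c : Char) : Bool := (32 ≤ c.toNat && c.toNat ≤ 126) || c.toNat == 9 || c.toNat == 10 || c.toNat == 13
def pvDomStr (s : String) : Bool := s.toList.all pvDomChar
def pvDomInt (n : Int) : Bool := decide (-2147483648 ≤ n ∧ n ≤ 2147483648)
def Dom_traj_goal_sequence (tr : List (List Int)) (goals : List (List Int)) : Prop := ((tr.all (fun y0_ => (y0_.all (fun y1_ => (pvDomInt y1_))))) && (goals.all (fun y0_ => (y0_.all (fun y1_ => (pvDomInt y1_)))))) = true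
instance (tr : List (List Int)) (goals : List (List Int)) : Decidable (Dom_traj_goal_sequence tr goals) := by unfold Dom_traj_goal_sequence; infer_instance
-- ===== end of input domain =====

-- B transposes A's scan: a goal-major sweep drops each goal index into per-point buckets,
-- then the flattened buckets are run-compressed in a final pass (objective: alternative).

-- ===== PORT A =====
def is_in_area (p R : List Int) : Int :=
  let x := PySem.List.pyGetD p 0 0
  let y := PySem.List.pyGetD p 1 0
  if x ≥ PySem.List.pyGetD R 0 0 ∧ x ≤ PySem.List.pyGetD R ((R.length : Int) - 2) 0 then
    if y ≥ PySem.List.pyGetD R 1 0 ∧ y ≤ PySem.List.pyGetD R ((R.length : Int) - 1) 0 then 1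
    else 0
  else 0

def traj_goal_sequence (tr : List (List Int)) (goals : List (List Int)) : List Int :=
  let x := PySem.List.pyGetD tr 0 []
  let y := PySem.List.pyGetD tr 1 []
  (PySem.List.pyRange 0 (x.length : Int) 1).foldl (fun goalSeq i =>
    (PySem.List.pyRange 0 (goals.length : Int) 1).foldl (fun goalSeq j =>
      let xy := [PySem.List.pyGetD x i 0, PySem.List.pyGetD y i 0]
      if is_in_area xy (PySem.List.pyGetD goals j []) ≠ 0 then
        if goalSeq.length = 0 then goalSeq ++ [j]
        else if j ≠ PySem.List.pyGetD goalSeq (-1) 0 then goalSeq ++ [j]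
        else goalSeq
      else goalSeq) goalSeq) []

-- ===== PORT B =====
-- Source B's is_in_area is character-for-character A's helper, so the port is shared.

def traj_goal_sequence_alt (tr : List (List Int)) (goals : List (List Int)) : List Int :=
  let x := PySem.List.pyGetD tr 0 []
  let y := PySem.List.pyGetD tr 1 []
  let n : Int := (x.length : Int)
  -- buckets = [[] for _ in range(n)], then the goal-major double loop mutating buckets[i]
  let buckets :=
    (PySem.List.enumerate goals 0).foldl (fun bkts jg =>
      (PySem.List.pyRange 0 n 1).foldl (fun bs i =>
        if is_in_area [PySem.List.pyGetD x i 0, PySem.List.pyGetD y i 0] jg.2 ≠ 0 then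
          bs.modify i.toNat (· ++ [jg.1])  -- buckets[i].append(j); 0 ≤ i since i ∈ range(n)
        else bs) bkts)
      ((PySem.List.pyRange 0 n 1).map (fun _ => ([] : List Int)))
  let flat := buckets.flatten
  (flat.zip ((none : Option Int) :: flat.map some)).filterMap
    (fun kp => if some kp.1 ≠ kp.2 then some kp.1 else none)

-- ===== PRECONDITION & SPEC =====
-- Pre_ excludes exactly the inputs on which A raises IndexError: fewer than two coordinate
-- rows, or — with points and goals present — a y row shorter than the x row, an empty goal
-- rectangle, or a one-bound goal some x-coordinate hits (so its missing y-bound is read).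
def Pre_traj_goal_sequence (tr : List (List Int)) (goals : List (List Int)) : Prop :=
  2 ≤ tr.length ∧
    (goals = [] ∨ tr.getD 0 [] = [] ∨
      ((tr.getD 0 []).length ≤ (tr.getD 1 []).length ∧
        ∀ g ∈ goals, 2 ≤ g.length ∨ (g.length = 1 ∧ ∀ c ∈ tr.getD 0 [], c ≠ g.getD 0 0)))
instance (tr : List (List Int)) (goals : List (List Int)) : Decidable (Pre_traj_goal_sequence tr goals) := by unfold Pre_traj_goal_sequence; infer_instance
def pvWitness_traj_goal_sequence : List (List Int) × List (List Int) :=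
  ([[0, 1, 5], [0, 1, 5]], [[0, 0, 1, 1], [4, 4, 6, 6]])

def Spec_traj_goal_sequence (tr : List (List Int)) (goals : List (List Int)) (out : List Int) : Prop := out = traj_goal_sequence_alt tr goals
instance (tr : List (List Int)) (goals : List (List Int)) (out : List Int) : Decidable (Spec_traj_goal_sequence tr goals out) := by unfold Spec_traj_goal_sequence; infer_instance

-- ===== CLAIM (what is proved, stated in full; the proofs are below) =====
def Claim_equal_traj_goal_sequence : Prop := ∀ (tr : List (List Int)) (goals : List (List Int)), Dom_traj_goal_sequence tr goals → Pre_traj_goal_sequence tr goals → Spec_traj_goal_sequence tr goals (traj_goal_sequence tr goals)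

-- ===== LEMMAS AND PROOFS =====

-- A's dedup-append step on the accumulator, factored out (same ifs as in the port of A).
def dstep (s : List Int) (j : Int) : List Int :=
  if s.length = 0 then s ++ [j]
  else if j ≠ PySem.List.pyGetD s (-1) 0 then s ++ [j]
  else s

-- run-compression with an explicit "previous element" state
def compressAux : Option Int → List Int → List Int
  | _, [] => []
  | prev, k :: ks =>
      if some k ≠ prev then k :: compressAux (some k) ks else compressAux (some k) ks

theorem compress_zip_eq (ms : List Int) (prev : Option Int) :
    (ms.zip (prev :: ms.map some)).filterMap
      (fun kp => if some kp.1 ≠ kp.2 then some kp.1 else none) = compressAux prev ms := by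
  induction ms generalizing prev with
  | nil => rfl
  | cons k ks ih =>
    simp only [List.map_cons, List.zip_cons_cons, List.filterMap_cons, compressAux]
    by_cases h : some k ≠ prev
    · rw [if_pos h, if_pos h, ih]
    · rw [if_neg h, if_neg h, ih]

theorem foldl_dstep_eq (ms : List Int) (s : List Int) :
    ms.foldl dstep s = s ++ compressAux s.getLast? ms := by
  induction ms generalizing s with
  | nil => simp [compressAux]
  | cons k ks ih =>
    simp only [List.foldl_cons]
    rcases s.eq_nil_or_concat with hs | ⟨t, a, rfl⟩
    · subst hs
      rw [show dstep [] k = [k] by rfl, ih]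
      simp [compressAux]
    · simp only [List.concat_eq_append]
      have hlast : PySem.List.pyGetD (t ++ [a]) (-1) 0 = a :=
        PySem.List.pyGetD_neg_one_append_singleton t a 0
      have hlq : (t ++ [a]).getLast? = some a := by simp
      by_cases hk : k = a
      · subst hk
        have hstep : dstep (t ++ [k]) k = t ++ [k] := by
          unfold dstep; rw [hlast]; simp
        rw [hstep, ih, hlq]
        simp [compressAux]
      · have hstep : dstep (t ++ [a]) k = (t ++ [a]) ++ [k] := by
          unfold dstep; rw [hlast]
          simp [hk]
        rw [hstep, ih]
        have h2 : ((t ++ [a]) ++ [k]).getLast? = some k := by simp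
        rw [h2, hlq]
        simp [compressAux, hk]

theorem foldl_guard_eq_filterMap (l : List Int) (P : Int → Prop) [DecidablePred P]
    (s : List Int) :
    l.foldl (fun s j => if P j then dstep s j else s) s
      = (l.filterMap (fun j => if P j then some j else none)).foldl dstep s := by
  induction l generalizing s with
  | nil => rfl
  | cons j js ih =>
    simp only [List.foldl_cons, List.filterMap_cons]
    by_cases h : P j
    · rw [if_pos h, if_pos h, ih]; rfl
    · rw [if_neg h, if_neg h, ih]

theorem foldl_inner_eq_flatMap {α : Type} (l : List α) (m : α → List Int) (s : List Int) :
    l.foldl (fun s a => (m a).foldl dstep s) s = (l.flatMap m).foldl dstep s := by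
  induction l generalizing s with
  | nil => rfl
  | cons a l ih => simp only [List.foldl_cons, List.flatMap_cons, List.foldl_append, ih]

theorem modify_append_cons {α : Type} : ∀ (pre : List α) (b : α) (l : List α) (u : α → α),
    (pre ++ b :: l).modify pre.length u = pre ++ u b :: l
  | [], b, l, u => by simp [List.modify]
  | a :: pre, b, l, u => by
    simp only [List.cons_append, List.length_cons, List.modify_succ_cons,
      modify_append_cons pre b l u]

-- one goal's inner point loop, with the touched index running over range', leaves any prefix alone
theorem foldl_modify_range' {α : Type} (C : Nat → Prop) [DecidablePred C] (u : α → α) :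
    ∀ (l pre : List α),
    (List.range' pre.length l.length).foldl
        (fun bs k => if C k then bs.modify k u else bs) (pre ++ l)
      = pre ++ l.mapIdx (fun k b => if C (pre.length + k) then u b else b)
  | [], pre => by simp
  | b :: l, pre => by
    rw [List.length_cons, List.range'_succ, List.foldl_cons]
    have hstep : (if C pre.length then (pre ++ b :: l).modify pre.length u else pre ++ b :: l)
        = (pre ++ [if C pre.length then u b else b]) ++ l := by
      split_ifs with h <;> simp [modify_append_cons]
    rw [hstep]
    have hlen : pre.length + 1 = (pre ++ [if C pre.length then u b else b]).length := by simp
    rw [hlen, foldl_modify_range' C u l (pre ++ [if C pre.length then u b else b])]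
    simp only [List.mapIdx_cons, List.append_assoc, List.cons_append, List.nil_append,
      List.length_append, List.length_singleton, Nat.add_zero]
    congr 2
    congr 1
    funext k b'
    have hk : pre.length + 1 + k = pre.length + (k + 1) := by omega
    rw [hk]

-- the goal-major double loop of B produces, per point, exactly the ascending list of matching goal indices
theorem buckets_fold (x y : List Int) :
    ∀ (gl : List (Int × List Int)) (bkts : List (List Int)), bkts.length = x.length →
    gl.foldl (fun bkts jg =>
        (PySem.List.pyRange 0 (x.length : Int) 1).foldl (fun bs i =>
          if is_in_area [PySem.List.pyGetD x i 0, PySem.List.pyGetD y i 0] jg.2 ≠ 0 then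
            bs.modify i.toNat (· ++ [jg.1])
          else bs) bkts) bkts
      = bkts.mapIdx (fun k b => b ++ gl.filterMap (fun jg =>
          if is_in_area [x.getD k 0, y.getD k 0] jg.2 ≠ 0 then some jg.1 else none))
  | [], bkts, h => by simp [List.mapIdx_eq_zipIdx_map]
  | jg :: gl, bkts, h => by
    rw [List.foldl_cons]
    have hinner :
        (PySem.List.pyRange 0 (x.length : Int) 1).foldl (fun bs i =>
          if is_in_area [PySem.List.pyGetD x i 0, PySem.List.pyGetD y i 0] jg.2 ≠ 0 then
            bs.modify i.toNat (· ++ [jg.1])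
          else bs) bkts
        = bkts.mapIdx (fun k b =>
            if is_in_area [x.getD k 0, y.getD k 0] jg.2 ≠ 0 then b ++ [jg.1] else b) := by
      have h1 := foldl_modify_range' (fun k =>
          is_in_area [x.getD k 0, y.getD k 0] jg.2 ≠ 0) (· ++ [jg.1]) bkts []
      simp only [List.nil_append, List.length_nil, Nat.zero_add] at h1
      rw [PySem.List.pyRange_one, List.foldl_map]
      simp only [Int.sub_zero, Int.toNat_natCast, zero_add, PySem.List.pyGetD_natCast]
      rw [← h, List.range_eq_range']
      exact h1
    rw [hinner, buckets_fold x y gl _ (by simp [h]), List.mapIdx_mapIdx]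
    congr 1
    funext k b
    simp only [List.filterMap_cons]
    split_ifs with hc <;> simp

theorem mapIdx_replicate_nil (G : Nat → List Int) :
    ∀ (n : Nat), (List.replicate n ([] : List Int)).mapIdx (fun k b => b ++ G k)
      = (List.range n).map G
  | 0 => rfl
  | n + 1 => by
    rw [List.replicate_succ, List.mapIdx_cons, List.range_succ_eq_map,
      List.map_cons, List.map_map]
    simp only [List.nil_append]
    rw [mapIdx_replicate_nil (fun k => G (k + 1)) n]
    rfl

theorem traj_goal_sequence_eq (tr : List (List Int)) (goals : List (List Int)) :
    traj_goal_sequence tr goals = traj_goal_sequence_alt tr goals := by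
  unfold traj_goal_sequence traj_goal_sequence_alt
  set x := PySem.List.pyGetD tr 0 [] with hx
  set y := PySem.List.pyGetD tr 1 [] with hy
  -- A's inner step is `dstep` guarded by the membership test
  have hbody : ∀ (s : List Int) (i : Int),
      (PySem.List.pyRange 0 (goals.length : Int) 1).foldl (fun goalSeq j =>
        let xy := [PySem.List.pyGetD x i 0, PySem.List.pyGetD y i 0]
        if is_in_area xy (PySem.List.pyGetD goals j []) ≠ 0 then
          if goalSeq.length = 0 then goalSeq ++ [j]
          else if j ≠ PySem.List.pyGetD goalSeq (-1) 0 then goalSeq ++ [j]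
          else goalSeq
        else goalSeq) s
      = ((PySem.List.pyRange 0 (goals.length : Int) 1).filterMap (fun j =>
          if is_in_area [PySem.List.pyGetD x i 0, PySem.List.pyGetD y i 0]
              (PySem.List.pyGetD goals j []) ≠ 0 then some j else none)).foldl dstep s := by
    intro s i
    rw [← foldl_guard_eq_filterMap]
    rfl
  simp only [hbody]
  -- A side: fold of dstep over the flat match list, outer pyRange → List.range
  rw [foldl_inner_eq_flatMap, foldl_dstep_eq]
  simp only [List.getLast?_nil, List.nil_append]
  conv_lhs => rw [PySem.List.pyRange_one 0 (x.length : Int)]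
  rw [List.flatMap_map]
  simp only [zero_add, PySem.List.pyGetD_natCast, Int.sub_zero, Int.toNat_natCast]
  -- B side: buckets → per-point match lists, flatten → flatMap, zip-compress → compressAux
  rw [buckets_fold x y (PySem.List.enumerate goals 0)
        ((PySem.List.pyRange 0 (x.length : Int) 1).map (fun _ => ([] : List Int)))
        (by simp [PySem.List.length_pyRange_one]),
      List.map_const', PySem.List.length_pyRange_one]
  simp only [Int.sub_zero, Int.toNat_natCast]
  rw [mapIdx_replicate_nil, ← List.flatMap_def, compress_zip_eq]
  congr 1
  apply List.flatMap_congr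
  intro k _
  rw [PySem.List.enumerate_eq_map_pyRange goals ([] : List Int), List.filterMap_map]
  rfl

-- ===== VERDICT (by name: the statement is the Claim_ definition above) =====
theorem traj_goal_sequence_spec : Claim_equal_traj_goal_sequence := by
  intro tr goals _ _
  unfold Spec_traj_goal_sequence
  exact traj_goal_sequence_eq tr goals
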